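-- pv_equiv track=rewrite | github.com/rahulshahepic/epic-stocks | backend/notifications.py | build_notification_payload
-- ===== SOURCE A (Python) =====
-- from collections import Counter
--
-- def build_notification_payload(events: list[dict]) -> dict | None:
--     if not events:
--         return None
--     counts = Counter(e["event_type"] for e in events)
--     total = sum(counts.values())
--     parts = [f"{count} {etype}" for etype, count in sorted(counts.items())]
--     body = f"You have {total} event{'s' if total != 1 else ''} today: {', '.join(parts)}"
--     return {"title": "Equity Tracker", "body": body}
-- ===== SOURCE B (Python) =====
-- def build_notification_payload(events: list[dict]) -> dict | None:
--     if not events: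
--         return None
--     keys = sorted(e["event_type"] for e in events)
--     parts = []
--     run_key, run_len = keys[0], 0
--     for k in keys:
--         if k == run_key:
--             run_len += 1
--         else:
--             parts.append(f"{run_len} {run_key}")
--             run_key, run_len = k, 1
--     parts.append(f"{run_len} {run_key}")
--     total = len(events)
--     body = f"You have {total} event{'s' if total != 1 else ''} today: {', '.join(parts)}"
--     return {"title": "Equity Tracker", "body": body}
-- ===== Notes on version B (the rewrite author's own statement) =====
-- stated objective: alternative
-- what changed: Replaces Counter-then-sorted-items with sorting the event-type keys once and emitting each 'count etype' part in a single run-length pass over the sorted keys, taking total = len(events).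
import Mathlib
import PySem

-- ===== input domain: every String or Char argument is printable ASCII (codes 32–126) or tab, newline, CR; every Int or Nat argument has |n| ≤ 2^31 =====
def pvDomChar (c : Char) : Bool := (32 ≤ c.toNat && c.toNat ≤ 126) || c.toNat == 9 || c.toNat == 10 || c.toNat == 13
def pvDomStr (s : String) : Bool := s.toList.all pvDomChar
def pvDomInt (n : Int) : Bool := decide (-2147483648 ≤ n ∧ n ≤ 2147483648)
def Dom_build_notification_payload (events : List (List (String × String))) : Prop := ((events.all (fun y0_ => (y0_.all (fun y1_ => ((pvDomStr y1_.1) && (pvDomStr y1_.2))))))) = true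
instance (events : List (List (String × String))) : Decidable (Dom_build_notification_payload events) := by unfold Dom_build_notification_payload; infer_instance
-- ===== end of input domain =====

-- B replaces Counter-then-sorted-items by one sort of the keys plus a run-length pass (alternative
-- decomposition, similar cost). Equivalence of RETURN values is what is proved; neither mutates its input.

-- ===== PORT A =====
-- f"{count} {etype}"
def pvMkPartA (count : Int) (etype : String) : String :=
  PySem.Int.toStr count ++ " " ++ etype

-- the generator (e["event_type"] for e in events); none = KeyError (excluded by Pre_)
def pvEventTypesA : List (List (String × String)) → Option (List String)
  | [] => some []
  | e :: rest =>
    match PySem.Dict.get? (PySem.Dict.mk e) "event_type" with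
    | none => none
    | some k =>
      match pvEventTypesA rest with
      | none => none
      | some ks => some (k :: ks)

def build_notification_payload (events : List (List (String × String))) : Option (List (String × String)) :=
  if events = [] then none
  else
    match pvEventTypesA events with
    | none => none   -- KeyError in Python; excluded by Pre_
    | some ks =>
      let counts := PySem.Dict.counter ks
      let total : Int := counts.values.sum
      let parts := (PySem.List.sorted2 counts.items (fun p => p.1) (fun p => p.2)).map
        (fun p => pvMkPartA p.2 p.1)
      let body := "You have " ++ PySem.Int.toStr total ++ " event" ++
        (if total ≠ 1 then "s" else "") ++ " today: " ++ PySem.Str.join ", " parts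
      some [("title", "Equity Tracker"), ("body", body)]

-- ===== PORT B =====
-- f"{run_len} {run_key}"
def pvMkPartB (run_len : Int) (run_key : String) : String :=
  PySem.Int.toStr run_len ++ " " ++ run_key

-- the generator feeding sorted(...); none = KeyError (excluded by Pre_)
def pvEventTypesB : List (List (String × String)) → Option (List String)
  | [] => some []
  | e :: rest =>
    (PySem.Dict.get? (PySem.Dict.mk e) "event_type").bind fun k =>
      (pvEventTypesB rest).map (k :: ·)

def build_notification_payload_alt (events : List (List (String × String))) : Option (List (String × String)) :=
  if events = [] then none
  else
    match pvEventTypesB events with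
    | none => none   -- KeyError in Python; excluded by Pre_
    | some ks =>
      let keys := PySem.List.sorted ks (fun k => k)
      match keys with
      | [] => none   -- keys[0] would raise IndexError; unreachable since events ≠ []
      | k0 :: _ =>
        let st := keys.foldl
          (fun (s : String × Int × List String) k =>
            if k == s.1 then (s.1, s.2.1 + 1, s.2.2)
            else (k, 1, s.2.2 ++ [pvMkPartB s.2.1 s.1]))
          (k0, 0, [])
        let parts := st.2.2 ++ [pvMkPartB st.2.1 st.1]
        let total : Int := events.length
        let body := "You have " ++ PySem.Int.toStr total ++ " event" ++
          (if total ≠ 1 then "s" else "") ++ " today: " ++ PySem.Str.join ", " parts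
        some [("title", "Equity Tracker"), ("body", body)]

-- ===== PRECONDITION & SPEC =====
-- Pre_ excludes events that lack the key "event_type": both Pythons raise KeyError there.
def Pre_build_notification_payload (events : List (List (String × String))) : Prop :=
  (events.all (fun e => e.any (fun p => p.1 == "event_type"))) = true
instance (events : List (List (String × String))) : Decidable (Pre_build_notification_payload events) := by unfold Pre_build_notification_payload; infer_instance

def pvWitness_build_notification_payload : (List (List (String × String))) :=
  [[("event_type", "earnings")], [("event_type", "dividend"), ("ticker", "AAPL")]]

def Spec_build_notification_payload (events : List (List (String × String))) (out : Option (List (String × String))) : Prop := out = build_notification_payload_alt events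
instance (events : List (List (String × String))) (out : Option (List (String × String))) : Decidable (Spec_build_notification_payload events out) := by unfold Spec_build_notification_payload; infer_instance

-- ===== CLAIM (what is proved, stated in full; the proofs are below) =====
def Claim_equal_build_notification_payload : Prop := ∀ (events : List (List (String × String))), Dom_build_notification_payload events → Pre_build_notification_payload events → Spec_build_notification_payload events (build_notification_payload events)

-- ===== LEMMAS AND PROOFS =====

-- the sorted distinct keys, increasing
def pvC (l : List String) : List String :=
  PySem.List.sorted (PySem.Set.ofList l) (fun k => k)

lemma pvEventTypesB_eq (events : List (List (String × String))) :
    pvEventTypesB events = pvEventTypesA events := by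
  induction events with
  | nil => rfl
  | cons e rest ih =>
    simp only [pvEventTypesA, pvEventTypesB, ih]
    cases PySem.Dict.get? (PySem.Dict.mk e) "event_type" <;>
      cases pvEventTypesA rest <;> rfl

lemma pvEventTypesA_some (events : List (List (String × String)))
    (h : Pre_build_notification_payload events) :
    ∃ ks, pvEventTypesA events = some ks ∧ ks.length = events.length := by
  induction events with
  | nil => exact ⟨[], rfl, rfl⟩
  | cons e rest ih =>
    simp only [Pre_build_notification_payload, List.all_cons, Bool.and_eq_true] at h
    obtain ⟨he, hrest⟩ := h
    obtain ⟨ks, hks, hlen⟩ := ih hrest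
    have : ∃ k, PySem.Dict.get? (PySem.Dict.mk e) "event_type" = some k := by
      rw [← Option.isSome_iff_exists, ← PySem.Dict.contains_eq_isSome_get?]
      simpa [PySem.Dict.contains] using he
    obtain ⟨k, hk⟩ := this
    exact ⟨k :: ks, by simp [pvEventTypesA, hk, hks], by simp [hlen]⟩

lemma pvC_nodup (l : List String) : (pvC l).Nodup :=
  (PySem.List.sorted_perm _ _ _).nodup_iff.mpr (PySem.Set.nodup_ofList l)

lemma pvC_mem (l : List String) (x : String) : x ∈ pvC l ↔ x ∈ l := by
  rw [pvC, PySem.List.mem_sorted, PySem.Set.mem_ofList]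

lemma pvC_pairwise_lt (l : List String) : (pvC l).Pairwise (· < ·) := by
  have h1 := PySem.List.sorted_pairwise (PySem.Set.ofList l) (fun k => k)
  have h2 : (pvC l).Pairwise (· ≠ ·) := (pvC_nodup l)
  exact (h2.and h1).imp (fun h => lt_of_le_of_ne h.2 h.1)

lemma pvC_perm_of_mem_iff (l l' : List String) (h : ∀ x, x ∈ l ↔ x ∈ l') :
    pvC l = pvC l' := by
  refine PySem.List.sorted_eq_sorted_of_perm _ _ _ (fun a b => id) ?_
  rw [List.perm_ext_iff_of_nodup (PySem.Set.nodup_ofList _) (PySem.Set.nodup_ofList _)]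
  intro a; rw [PySem.Set.mem_ofList, PySem.Set.mem_ofList]; exact h a

lemma pvInsertBy_congr {α : Type} (b1 b2 : α → α → Bool) (x : α) (ys : List α)
    (h : ∀ y ∈ ys, b1 x y = b2 x y) :
    PySem.List.insertBy b1 x ys = PySem.List.insertBy b2 x ys := by
  induction ys with
  | nil => rfl
  | cons y t ih =>
    simp only [PySem.List.insertBy, h y (by simp)]
    by_cases hb : b2 x y = true
    · simp [hb]
    · simp only [hb, if_neg, Bool.not_eq_true] at *
      simp
      exact ih (fun z hz => h z (by simp [hz]))

lemma pvFoldl_insertBy_congr {α : Type} (b1 b2 : α → α → Bool) (xs : List α)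
    (S : List α) (hxs : ∀ x ∈ xs, x ∈ S)
    (h : ∀ a ∈ S, ∀ b ∈ S, b1 a b = b2 a b) :
    ∀ acc, (∀ x ∈ acc, x ∈ S) →
    xs.foldl (fun acc x => PySem.List.insertBy b1 x acc) acc
      = xs.foldl (fun acc x => PySem.List.insertBy b2 x acc) acc := by
  induction xs with
  | nil => intro acc _; rfl
  | cons x t ih =>
    intro acc hacc
    have hx : x ∈ S := hxs x (by simp)
    simp only [List.foldl_cons]
    rw [pvInsertBy_congr b1 b2 x acc (fun y hy => h x hx y (hacc y hy))]
    exact ih (fun z hz => hxs z (by simp [hz])) _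
      (fun z hz => ((PySem.List.mem_insertBy _ _ _ _).mp hz).elim (fun e => e ▸ hx) (hacc z))

lemma pvSorted2_eq_sorted {α κ₁ κ₂ : Type} [LinearOrder κ₁] [LinearOrder κ₂]
    (xs : List α) (k1 : α → κ₁) (k2 : α → κ₂)
    (hinj : ∀ a ∈ xs, ∀ b ∈ xs, k1 a = k1 b → a = b) :
    PySem.List.sorted2 xs k1 k2 = PySem.List.sorted xs k1 := by
  show xs.foldl (fun acc x => PySem.List.insertBy _ x acc) [] = _
  rw [PySem.List.sorted]
  refine pvFoldl_insertBy_congr _ _ xs xs (fun x hx => hx) ?_ [] (by simp)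
  intro a ha b hb
  by_cases hlt : k1 a < k1 b
  · simp [hlt]
  · by_cases hgt : k1 b < k1 a
    · simp [hlt, hgt]
    · have : a = b := hinj a ha b hb (le_antisymm (not_lt.mp hgt) (not_lt.mp hlt))
      subst this
      simp

lemma pvPartsA (ks : List String) :
    PySem.List.sorted2 (PySem.Dict.counter ks).items (fun p => p.1) (fun p => p.2)
      = (pvC ks).map (fun k => (k, (ks.count k : Int))) := by
  rw [pvSorted2_eq_sorted]
  · refine PySem.List.sorted_eq_of_perm_of_pairwise_lt _ _ _ ?_ ?_
    · rw [PySem.Dict.items_counter]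
      exact (PySem.List.sorted_perm _ _ _).map _
    · rw [List.pairwise_map]
      exact pvC_pairwise_lt ks
  · intro a ha b hb hab
    rw [PySem.Dict.items_counter, List.mem_map] at ha hb
    obtain ⟨x, _, rfl⟩ := ha
    obtain ⟨y, _, rfl⟩ := hb
    simp at hab; simp [hab]

lemma pvTotalA (ks : List String) :
    (PySem.Dict.counter ks).values.sum = (ks.length : Int) := by
  have hv : (PySem.Dict.counter ks).values
      = (PySem.Set.ofList ks).map (fun k => (ks.count k : Int)) := by
    show (PySem.Dict.counter ks).items.map (fun p => p.2) = _
    rw [PySem.Dict.items_counter, List.map_map]; rfl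
  rw [hv]
  rw [show (fun k => ((ks.count k : Nat) : Int))
        = (fun n : Nat => (n : Int)) ∘ (fun k => ks.count k) from rfl,
    ← List.map_map, ← Nat.cast_list_sum]
  congr 1
  have hperm : (PySem.Set.ofList ks).Perm ks.dedup := by
    rw [List.perm_ext_iff_of_nodup (PySem.Set.nodup_ofList _) (List.nodup_dedup _)]
    intro a; rw [PySem.Set.mem_ofList, List.mem_dedup]
  rw [(hperm.map (fun k => ks.count k)).sum_eq]
  simpa using List.sum_map_count_dedup_eq_length ks

-- B's run-length loop, as a recursion
def pvRLE : List String → String → Int → List String → List String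
  | [], cur, cnt, parts => parts ++ [pvMkPartB cnt cur]
  | k :: t, cur, cnt, parts =>
    if k == cur then pvRLE t cur (cnt + 1) parts
    else pvRLE t k 1 (parts ++ [pvMkPartB cnt cur])

lemma pvFold_eq_RLE (l : List String) : ∀ (cur : String) (cnt : Int) (parts : List String),
    (l.foldl
        (fun (s : String × Int × List String) k =>
          if k == s.1 then (s.1, s.2.1 + 1, s.2.2)
          else (k, 1, s.2.2 ++ [pvMkPartB s.2.1 s.1]))
        (cur, cnt, parts)).2.2
      ++ [pvMkPartB
            (l.foldl
              (fun (s : String × Int × List String) k =>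
                if k == s.1 then (s.1, s.2.1 + 1, s.2.2)
                else (k, 1, s.2.2 ++ [pvMkPartB s.2.1 s.1]))
              (cur, cnt, parts)).2.1
            (l.foldl
              (fun (s : String × Int × List String) k =>
                if k == s.1 then (s.1, s.2.1 + 1, s.2.2)
                else (k, 1, s.2.2 ++ [pvMkPartB s.2.1 s.1]))
              (cur, cnt, parts)).1]
      = pvRLE l cur cnt parts := by
  induction l with
  | nil => intro cur cnt parts; rfl
  | cons k t ih =>
    intro cur cnt parts
    simp only [List.foldl_cons, pvRLE]
    by_cases h : k == cur
    · simp only [h, if_pos]; exact ih cur (cnt + 1) parts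
    · simp only [h, Bool.false_eq_true, if_false]
      exact ih k 1 (parts ++ [pvMkPartB cnt cur])

-- pvC step on a sorted cons
lemma pvC_cons_of_sorted (k : String) (t : List String)
    (hp : (k :: t).Pairwise (· ≤ ·)) :
    pvC (k :: t) = k :: pvC (t.filter (fun x => x ≠ k)) := by
  have hmin : ∀ x ∈ t, k ≤ x := (List.pairwise_cons.mp hp).1
  refine PySem.List.sorted_eq_of_perm_of_pairwise_lt _ _ _ ?_ ?_
  · rw [List.perm_ext_iff_of_nodup ?_ (PySem.Set.nodup_ofList _)]
    · intro a
      simp only [List.mem_cons, pvC_mem, List.mem_filter, PySem.Set.mem_ofList,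
        decide_eq_true_eq]
      constructor
      · rintro (rfl | ⟨ha, _⟩)
        · exact .inl rfl
        · exact .inr ha
      · rintro (rfl | ha)
        · exact .inl rfl
        · by_cases hak : a = k
          · exact .inl hak
          · exact .inr ⟨ha, hak⟩
    · refine List.nodup_cons.mpr ⟨?_, pvC_nodup _⟩
      intro hk
      rw [pvC_mem, List.mem_filter] at hk
      simp at hk
  · refine List.pairwise_cons.mpr ⟨?_, pvC_pairwise_lt _⟩
    intro x hx
    rw [pvC_mem, List.mem_filter] at hx
    obtain ⟨hxt, hxk⟩ := hx
    rw [decide_eq_true_eq] at hxk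
    exact lt_of_le_of_ne (hmin x hxt) (Ne.symm hxk)

lemma pvRLE_spec (l : List String) : ∀ (cur : String) (cnt : Int) (parts : List String),
    l.Pairwise (· ≤ ·) → (∀ x ∈ l, cur ≤ x) →
    pvRLE l cur cnt parts = parts ++ pvMkPartB (cnt + l.count cur) cur
      :: (pvC (l.filter (fun x => x ≠ cur))).map
           (fun k => pvMkPartB ((l.filter (fun x => x ≠ cur)).count k) k) := by
  induction l with
  | nil => intro cur cnt parts _ _; simp [pvRLE, pvC, PySem.List.sorted]
  | cons k t ih =>
    intro cur cnt parts hp hmin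
    have hkt : ∀ x ∈ t, k ≤ x := (List.pairwise_cons.mp hp).1
    have ht : t.Pairwise (· ≤ ·) := (List.pairwise_cons.mp hp).2
    by_cases hk : k = cur
    · subst hk
      simp only [pvRLE, BEq.rfl, if_pos]
      rw [ih k (cnt + 1) parts ht hkt]
      have hf : (k :: t).filter (fun x => x ≠ k) = t.filter (fun x => x ≠ k) := by simp
      rw [hf]
      congr 3
      rw [List.count_cons_self]
      push_cast; ring
    · have hbeq : (k == cur) = false := by simpa using hk
      simp only [pvRLE, hbeq, Bool.false_eq_true, if_false]
      have hcurlt : ∀ x ∈ k :: t, cur < x := by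
        intro x hx
        rcases List.mem_cons.mp hx with rfl | hxt
        · exact lt_of_le_of_ne (hmin x (by simp)) (Ne.symm hk)
        · exact lt_of_lt_of_le (lt_of_le_of_ne (hmin k (by simp)) (Ne.symm hk)) (hkt x hxt)
      rw [ih k 1 (parts ++ [pvMkPartB cnt cur]) ht hkt]
      have hfilt : (k :: t).filter (fun x => x ≠ cur) = k :: t := by
        rw [List.filter_eq_self]
        intro a ha; simpa using (hcurlt a ha).ne'
      have hcnt0 : (k :: t).count cur = 0 := by
        rw [List.count_eq_zero]
        intro hmem; exact absurd rfl (hcurlt cur hmem).ne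
      rw [hfilt, pvC_cons_of_sorted k t hp]
      simp only [List.map_cons, List.append_assoc, List.cons_append, List.nil_append]
      rw [show pvMkPartB cnt cur = pvMkPartB (cnt + (((k :: t).count cur : Nat) : Int)) cur from by
        rw [hcnt0]; norm_num]
      rw [show pvMkPartB (1 + ((t.count k : Nat) : Int)) k
            = pvMkPartB (((k :: t).count k : Nat) : Int) k from by
        rw [List.count_cons_self]; congr 1; push_cast; omega]
      have h3 : List.map (fun j => pvMkPartB ((List.count j (t.filter (fun x => x ≠ k)) : Nat) : Int) j)
            (pvC (t.filter (fun x => x ≠ k)))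
          = List.map (fun j => pvMkPartB ((List.count j (k :: t) : Nat) : Int) j)
            (pvC (t.filter (fun x => x ≠ k))) := by
        refine List.map_congr_left ?_
        intro j hj
        rw [pvC_mem, List.mem_filter, decide_eq_true_eq] at hj
        rw [List.count_cons_of_ne (by simpa using (Ne.symm hj.2)),
          List.count_filter (by simpa using hj.2)]
      rw [h3]

-- ===== VERDICT (by name: the statement is the Claim_ definition above) =====
theorem build_notification_payload_spec : Claim_equal_build_notification_payload := by
  intro events _ hpre
  show build_notification_payload events = build_notification_payload_alt events
  by_cases hev : events = []
  · subst hev; rfl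
  obtain ⟨ks, hks, hlen⟩ := pvEventTypesA_some events hpre
  have hksB := pvEventTypesB_eq events
  rw [hks] at hksB
  have hkne : ks ≠ [] := by
    intro h; subst h
    exact hev (List.eq_nil_of_length_eq_zero hlen.symm)
  obtain ⟨k0, rest, heq⟩ : ∃ k0 rest, PySem.List.sorted ks (fun k => k) = k0 :: rest := by
    cases h : PySem.List.sorted ks (fun k => k) with
    | nil => exact absurd ((PySem.List.sorted_eq_nil_iff _ _ _).mp h) hkne
    | cons a b => exact ⟨a, b, rfl⟩
  have hlperm : (k0 :: rest).Perm ks := heq ▸ PySem.List.sorted_perm ks (fun k => k) false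
  have hlp : (k0 :: rest).Pairwise (· ≤ ·) := by
    have := PySem.List.sorted_pairwise ks (fun k => k)
    rw [heq] at this; exact this
  have hmin : ∀ x ∈ k0 :: rest, k0 ≤ x := by
    intro x hx
    rcases List.mem_cons.mp hx with rfl | hxt
    · exact le_refl x
    · exact (List.pairwise_cons.mp hlp).1 x hxt
  have hpartsB : pvRLE (k0 :: rest) k0 0 []
      = (pvC ks).map (fun k => pvMkPartB ((ks.count k : Nat) : Int) k) := by
    rw [pvRLE_spec _ _ _ _ hlp hmin]
    have hCks : pvC ks = k0 :: pvC ((k0 :: rest).filter (fun x => x ≠ k0)) := by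
      rw [pvC_perm_of_mem_iff ks (k0 :: rest) (fun x => by
        rw [← heq, PySem.List.mem_sorted])]
      rw [show List.filter (fun x => decide (x ≠ k0)) (k0 :: rest)
            = List.filter (fun x => decide (x ≠ k0)) rest from by simp]
      exact pvC_cons_of_sorted k0 rest hlp
    rw [hCks]
    simp only [List.map_cons, List.nil_append]
    congr 1
    · congr 1
      rw [hlperm.count_eq k0]
      ring
    · refine List.map_congr_left ?_
      intro j hj
      rw [pvC_mem, List.mem_filter, decide_eq_true_eq] at hj
      congr 1
      rw [List.count_filter (by simpa using hj.2)]
      exact congrArg _ (hlperm.count_eq j)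
  simp only [build_notification_payload, build_notification_payload_alt, if_neg hev,
    hks, hksB, heq]
  rw [pvFold_eq_RLE, hpartsB, pvTotalA, hlen, pvPartsA, List.map_map]
  rfl
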